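-- pv_equiv track=rewrite | github.com/joeljohansson99/adventofcode | 2019/python/src/day15.py | to_empty_square
-- ===== SOURCE A (Python) =====
-- def to_empty_square(pos, visited, walls):
--     if pos not in visited and pos not in walls:
--         return 0
--     current = [pos]
--     seen = set()
--     seen.add(pos)
--     steps = 0
--     while current:
--         steps += 1
--         next = []
--         for (r,c) in current:
--             for (dr,dc) in neighbours((r,c)):
--                 if (dr,dc) in visited and (dr,dc) not in seen:
--                     next.append((dr,dc))
--                     seen.add((dr,dc))
--                 elif (dr,dc) not in visited and (dr,dc) not in walls:
--                     return steps
--         current = next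
--     return -1
--
-- def neighbours(pos):
--     (r,c) = pos
--     return [(r+1,c), (r-1,c), (r,c-1), (r,c+1)]
-- ===== SOURCE B (Python) =====
-- def neighbours(pos):
--     (r, c) = pos
--     return [(r+1, c), (r-1, c), (r, c-1), (r, c+1)]
--
-- def to_empty_square(pos, visited, walls):
--     if pos not in visited and pos not in walls:
--         return 0
--
--     def exposed(cell):
--         return any(n not in visited and n not in walls for n in neighbours(cell))
--
--     region = {pos}
--     steps = 0
--     while True:
--         steps += 1
--         if any(exposed(u) for u in region):
--             return steps
--         grown = region | {n for u in region for n in neighbours(u) if n in visited}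
--         if len(grown) == len(region):
--             return -1
--         region = grown
-- ===== Notes on version B (the rewrite author's own statement) =====
-- stated objective: alternative
-- what changed: Replaces the frontier/seen BFS (per-level frontier list, seen set, early return inside the neighbour scan) by a region-closure fixpoint: keep only one set, test the whole current region for an exposed cell each round, grow it by one closure step (region | visited-neighbours-of-region), and stop at the fixpoint.
import Mathlib
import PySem

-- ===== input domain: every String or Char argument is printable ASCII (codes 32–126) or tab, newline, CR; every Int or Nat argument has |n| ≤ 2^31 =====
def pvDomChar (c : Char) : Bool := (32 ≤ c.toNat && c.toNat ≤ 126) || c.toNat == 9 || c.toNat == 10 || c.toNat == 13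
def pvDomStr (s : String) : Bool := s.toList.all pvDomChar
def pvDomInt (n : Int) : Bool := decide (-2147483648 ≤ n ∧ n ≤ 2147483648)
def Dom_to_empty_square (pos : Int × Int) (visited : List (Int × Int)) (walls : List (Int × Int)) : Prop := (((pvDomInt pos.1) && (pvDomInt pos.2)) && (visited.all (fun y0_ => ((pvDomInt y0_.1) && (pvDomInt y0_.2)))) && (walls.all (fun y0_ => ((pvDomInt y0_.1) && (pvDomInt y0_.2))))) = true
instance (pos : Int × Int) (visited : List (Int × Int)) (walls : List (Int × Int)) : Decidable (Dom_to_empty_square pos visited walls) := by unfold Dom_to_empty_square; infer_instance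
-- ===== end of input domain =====

-- B replaces A's frontier/seen BFS by a region-closure fixpoint: one set, a whole-region
-- exposure test each round, one closure step of growth, stop at the fixpoint (objective: alternative).

-- ===== PORT A =====
-- helper neighbours(pos)
def pyNeighbours (p : Int × Int) : List (Int × Int) :=
  [(p.1 + 1, p.2), (p.1 - 1, p.2), (p.1, p.2 - 1), (p.1, p.2 + 1)]

-- inner 'for (dr,dc) in neighbours((r,c))' loop; none = the early 'return steps'
def nbLoopA (visited walls : List (Int × Int)) :
    List (Int × Int) → List (Int × Int) → PySem.Set (Int × Int) →
    Option (List (Int × Int) × PySem.Set (Int × Int))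
  | [], next, seen => some (next, seen)
  | nb :: nbs, next, seen =>
      if nb ∈ visited ∧ nb ∉ seen then
        nbLoopA visited walls nbs (next ++ [nb]) (PySem.Set.add seen nb)
      else if nb ∉ visited ∧ nb ∉ walls then
        none
      else
        nbLoopA visited walls nbs next seen

-- 'for (r,c) in current' loop of one level
def levelA (visited walls : List (Int × Int)) :
    List (Int × Int) → List (Int × Int) → PySem.Set (Int × Int) →
    Option (List (Int × Int) × PySem.Set (Int × Int))
  | [], next, seen => some (next, seen)
  | v :: rest, next, seen =>
      match nbLoopA visited walls (pyNeighbours v) next seen with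
      | none => none
      | some (next', seen') => levelA visited walls rest next' seen'

-- 'while current' loop; fuel only makes the recursion total (none = fuel ran out,
-- proved unreachable for the fuel the port passes)
def outerA (visited walls : List (Int × Int)) :
    Nat → List (Int × Int) → PySem.Set (Int × Int) → Int → Option Int
  | _, [], _, _ => some (-1)
  | 0, _ :: _, _, _ => none
  | f + 1, v :: rest, seen, steps =>
      match levelA visited walls (v :: rest) [] seen with
      | none => some (steps + 1)
      | some (next, seen') => outerA visited walls f next seen' (steps + 1)

def to_empty_square (pos : Int × Int) (visited : List (Int × Int)) (walls : List (Int × Int)) : Int :=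
  if pos ∉ visited ∧ pos ∉ walls then 0
  else
    (outerA visited walls (visited.length + 2) [pos]
      (PySem.Set.add PySem.Set.empty pos) 0).getD (-1)

-- ===== PORT B =====
-- 'any(n not in visited and n not in walls for n in neighbours(cell))'
def exposedB (visited walls : List (Int × Int)) (u : Int × Int) : Bool :=
  (pyNeighbours u).any (fun n => decide (n ∉ visited ∧ n ∉ walls))

-- '{n for n in neighbours(u) if n in visited}' merged into the accumulator set
def growCell (visited : List (Int × Int)) (acc : PySem.Set (Int × Int)) (u : Int × Int) :
    PySem.Set (Int × Int) :=
  (pyNeighbours u).foldl (fun a n => if n ∈ visited then PySem.Set.add a n else a) acc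

-- 'region | {n for u in region for n in neighbours(u) if n in visited}'
def growB (visited : List (Int × Int)) (region : PySem.Set (Int × Int)) :
    PySem.Set (Int × Int) :=
  region.foldl (growCell visited) region

-- 'while True' loop; fuel only makes the recursion total (none = fuel ran out,
-- proved unreachable for the fuel the port passes)
def loopC (visited walls : List (Int × Int)) :
    Nat → PySem.Set (Int × Int) → Int → Option Int
  | 0, _, _ => none
  | f + 1, region, steps =>
      if region.any (exposedB visited walls) then some (steps + 1)
      else
        let grown := growB visited region
        if grown.length = region.length then some (-1)
        else loopC visited walls f grown (steps + 1)

def to_empty_square_alt (pos : Int × Int) (visited : List (Int × Int)) (walls : List (Int × Int)) : Int :=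
  if pos ∉ visited ∧ pos ∉ walls then 0
  else
    (loopC visited walls (visited.length + 2) (PySem.Set.ofList [pos]) 0).getD (-1)

-- ===== PRECONDITION & SPEC =====
def Spec_to_empty_square (pos : Int × Int) (visited : List (Int × Int)) (walls : List (Int × Int)) (out : Int) : Prop := out = to_empty_square_alt pos visited walls
instance (pos : Int × Int) (visited : List (Int × Int)) (walls : List (Int × Int)) (out : Int) : Decidable (Spec_to_empty_square pos visited walls out) := by unfold Spec_to_empty_square; infer_instance

-- ===== CLAIM (what is proved, stated in full; the proofs are below) =====
def Claim_equal_to_empty_square : Prop := ∀ (pos : Int × Int) (visited : List (Int × Int)) (walls : List (Int × Int)), Dom_to_empty_square pos visited walls → Spec_to_empty_square pos visited walls (to_empty_square pos visited walls)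

-- ===== LEMMAS AND PROOFS =====

-- A's inner loop early-returns exactly when some neighbour is unexplored and not a wall
theorem nbLoopA_none_iff (V W : List (Int × Int)) :
    ∀ (nbs next : List (Int × Int)) (seen : PySem.Set (Int × Int)),
    nbLoopA V W nbs next seen = none ↔ ∃ nb ∈ nbs, nb ∉ V ∧ nb ∉ W := by
  intro nbs
  induction nbs with
  | nil => intro next seen; simp [nbLoopA]
  | cons nb nbs ih =>
    intro next seen
    simp only [nbLoopA]
    split_ifs with h1 h2
    · rw [ih]
      constructor
      · rintro ⟨x, hx, hxp⟩; exact ⟨x, List.mem_cons_of_mem _ hx, hxp⟩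
      · rintro ⟨x, hx, hxp⟩
        rcases List.mem_cons.mp hx with rfl | hx'
        · exact absurd h1.1 hxp.1
        · exact ⟨x, hx', hxp⟩
    · exact ⟨fun _ => ⟨nb, List.mem_cons_self, h2⟩, fun _ => rfl⟩
    · rw [ih]
      constructor
      · rintro ⟨x, hx, hxp⟩; exact ⟨x, List.mem_cons_of_mem _ hx, hxp⟩
      · rintro ⟨x, hx, hxp⟩
        rcases List.mem_cons.mp hx with rfl | hx'
        · exact absurd hxp h2
        · exact ⟨x, hx', hxp⟩

-- A's level early-returns exactly when some frontier cell is exposed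
theorem levelA_none_iff (V W : List (Int × Int)) :
    ∀ (cur next : List (Int × Int)) (seen : PySem.Set (Int × Int)),
    levelA V W cur next seen = none ↔ ∃ u ∈ cur, exposedB V W u = true := by
  intro cur
  induction cur with
  | nil => intro next seen; simp [levelA]
  | cons v rest ih =>
    intro next seen
    simp only [levelA]
    cases hnb : nbLoopA V W (pyNeighbours v) next seen with
    | none =>
      rw [nbLoopA_none_iff] at hnb
      simp only [true_iff]
      refine ⟨v, List.mem_cons_self, ?_⟩
      simp only [exposedB, List.any_eq_true, decide_eq_true_eq]
      exact hnb
    | some p =>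
      obtain ⟨next', seen'⟩ := p
      rw [ih]
      constructor
      · rintro ⟨u, hu, hex⟩; exact ⟨u, List.mem_cons_of_mem _ hu, hex⟩
      · rintro ⟨u, hu, hex⟩
        rcases List.mem_cons.mp hu with rfl | hu'
        · exfalso
          simp only [exposedB, List.any_eq_true, decide_eq_true_eq] at hex
          have : nbLoopA V W (pyNeighbours u) next seen = none :=
            (nbLoopA_none_iff V W _ next seen).mpr hex
          simp [this] at hnb
        · exact ⟨u, hu', hex⟩

-- A's inner loop, when it completes, changes seen exactly by B's per-cell growth step
theorem nbLoopA_some_seen (V W : List (Int × Int)) :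
    ∀ (nbs next : List (Int × Int)) (seen : PySem.Set (Int × Int)) nx s',
    nbLoopA V W nbs next seen = some (nx, s') →
    s' = nbs.foldl (fun a n => if n ∈ V then PySem.Set.add a n else a) seen := by
  intro nbs
  induction nbs with
  | nil =>
    intro next seen nx s' h
    simp only [nbLoopA, Option.some_inj, Prod.mk.injEq] at h
    simp [h.2.symm]
  | cons nb nbs ih =>
    intro next seen nx s' h
    simp only [nbLoopA] at h
    split_ifs at h with h1 h2
    · simp only [List.foldl_cons, if_pos h1.1]
      exact ih _ _ _ _ h
    · by_cases hv : nb ∈ V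
      · simp only [List.foldl_cons, if_pos hv]
        have hmem : nb ∈ seen := by
          by_contra hns; exact h1 ⟨hv, hns⟩
        rw [PySem.Set.add_of_mem hmem]
        exact ih _ _ _ _ h
      · simp only [List.foldl_cons, if_neg hv]
        exact ih _ _ _ _ h

-- one completed level of A changes seen exactly by B's growth fold over the frontier
theorem levelA_some_seen (V W : List (Int × Int)) :
    ∀ (cur next : List (Int × Int)) (seen : PySem.Set (Int × Int)) nx s',
    levelA V W cur next seen = some (nx, s') →
    s' = cur.foldl (growCell V) seen := by
  intro cur
  induction cur with
  | nil =>
    intro next seen nx s' h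
    simp only [levelA, Option.some_inj, Prod.mk.injEq] at h
    simp [h.2.symm]
  | cons v rest ih =>
    intro next seen nx s' h
    simp only [levelA] at h
    cases hnb : nbLoopA V W (pyNeighbours v) next seen with
    | none => rw [hnb] at h; exact absurd h (by simp)
    | some p =>
      obtain ⟨next', seen'⟩ := p
      rw [hnb] at h
      have := nbLoopA_some_seen V W _ _ _ _ _ hnb
      simp only [List.foldl_cons]
      rw [show growCell V seen v = seen' from by rw [growCell, ← this]]
      exact ih _ _ _ _ h

-- membership is preserved and all visited neighbours land in the per-cell growth step
theorem gfold_mono (V : List (Int × Int)) :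
    ∀ (nbs : List (Int × Int)) (acc : PySem.Set (Int × Int)) x, x ∈ acc →
    x ∈ nbs.foldl (fun a n => if n ∈ V then PySem.Set.add a n else a) acc := by
  intro nbs
  induction nbs with
  | nil => intro acc x hx; simpa using hx
  | cons nb nbs ih =>
    intro acc x hx
    simp only [List.foldl_cons]
    apply ih
    split_ifs with hv
    · exact (PySem.Set.mem_add _ _ _).mpr (Or.inl hx)
    · exact hx

theorem gfold_mem (V : List (Int × Int)) :
    ∀ (nbs : List (Int × Int)) (acc : PySem.Set (Int × Int)) n, n ∈ nbs → n ∈ V →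
    n ∈ nbs.foldl (fun a n => if n ∈ V then PySem.Set.add a n else a) acc := by
  intro nbs
  induction nbs with
  | nil => intro acc n hn; simp at hn
  | cons nb nbs ih =>
    intro acc n hn hv
    rcases List.mem_cons.mp hn with rfl | hn'
    · simp only [List.foldl_cons, if_pos hv]
      exact gfold_mono V nbs _ n ((PySem.Set.mem_add _ _ _).mpr (Or.inr rfl))
    · exact ih _ n hn' hv

theorem growCell_mono (V : List (Int × Int)) (acc : PySem.Set (Int × Int)) (u : Int × Int)
    (x : Int × Int) (hx : x ∈ acc) : x ∈ growCell V acc u :=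
  gfold_mono V (pyNeighbours u) acc x hx

-- a cell all of whose visited neighbours are already present grows nothing
theorem growCell_id (V : List (Int × Int)) (acc : PySem.Set (Int × Int)) (u : Int × Int)
    (h : ∀ n ∈ pyNeighbours u, n ∈ V → n ∈ acc) : growCell V acc u = acc := by
  rw [growCell]
  have : ∀ (nbs : List (Int × Int)), (∀ n ∈ nbs, n ∈ V → n ∈ acc) →
      nbs.foldl (fun a n => if n ∈ V then PySem.Set.add a n else a) acc = acc := by
    intro nbs
    induction nbs with
    | nil => intro _; rfl
    | cons nb nbs ih =>
      intro hnb
      simp only [List.foldl_cons]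
      split_ifs with hv
      · rw [PySem.Set.add_of_mem (hnb nb List.mem_cons_self hv)]
        exact ih (fun n hn => hnb n (List.mem_cons_of_mem _ hn))
      · exact ih (fun n hn => hnb n (List.mem_cons_of_mem _ hn))
  exact this _ h

-- the growth fold over a list keeps old members and absorbs every visited neighbour
theorem foldl_growCell_mono (V : List (Int × Int)) :
    ∀ (cur : List (Int × Int)) (acc : PySem.Set (Int × Int)) x, x ∈ acc →
    x ∈ cur.foldl (growCell V) acc := by
  intro cur
  induction cur with
  | nil => intro acc x hx; simpa using hx
  | cons v rest ih =>
    intro acc x hx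
    exact ih _ x (growCell_mono V acc v x hx)

theorem foldl_growCell_closure (V : List (Int × Int)) :
    ∀ (cur : List (Int × Int)) (acc : PySem.Set (Int × Int)),
    ∀ u ∈ cur, ∀ n ∈ pyNeighbours u, n ∈ V →
    n ∈ cur.foldl (growCell V) acc := by
  intro cur
  induction cur with
  | nil => intro acc u hu; simp at hu
  | cons v rest ih =>
    intro acc u hu n hn hv
    rcases List.mem_cons.mp hu with rfl | hu'
    · exact foldl_growCell_mono V rest _ n (gfold_mem V (pyNeighbours u) acc n hn hv)
    · exact ih _ u hu' n hn hv

-- what a completed level adds: fresh, Nodup, appended to both next and seen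
theorem nbLoopA_adds (V W : List (Int × Int)) :
    ∀ (nbs next : List (Int × Int)) (seen : PySem.Set (Int × Int)) next1 seen1,
    nbLoopA V W nbs next seen = some (next1, seen1) →
    ∃ add, next1 = next ++ add ∧ seen1 = seen ++ add ∧
      (∀ x ∈ add, x ∈ V ∧ x ∉ seen) ∧ add.Nodup := by
  intro nbs
  induction nbs with
  | nil =>
    intro next seen next1 seen1 h
    simp only [nbLoopA, Option.some_inj, Prod.mk.injEq] at h
    exact ⟨[], by simp [h.1.symm, h.2.symm]⟩
  | cons nb nbs ih =>
    intro next seen next1 seen1 h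
    simp only [nbLoopA] at h
    split_ifs at h with h1 h2
    · rw [PySem.Set.add_of_not_mem h1.2] at h
      obtain ⟨add', e1, e2, hmem, hnd⟩ := ih (next ++ [nb]) (seen ++ [nb]) next1 seen1 h
      refine ⟨nb :: add', by simpa using e1, by simpa using e2, ?_, ?_⟩
      · intro x hx
        rcases List.mem_cons.mp hx with rfl | hx'
        · exact ⟨h1.1, h1.2⟩
        · have := hmem x hx'
          exact ⟨this.1, fun hc => this.2 (List.mem_append_left _ hc)⟩
      · refine List.nodup_cons.mpr ⟨?_, hnd⟩
        intro hc
        exact (hmem nb hc).2 (List.mem_append_right _ (List.mem_singleton.mpr rfl))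
    · exact ih next seen next1 seen1 h

theorem levelA_adds (V W : List (Int × Int)) :
    ∀ (cur next : List (Int × Int)) (seen : PySem.Set (Int × Int)) next1 seen1,
    levelA V W cur next seen = some (next1, seen1) →
    ∃ add, next1 = next ++ add ∧ seen1 = seen ++ add ∧
      (∀ x ∈ add, x ∈ V ∧ x ∉ seen) ∧ add.Nodup := by
  intro cur
  induction cur with
  | nil =>
    intro next seen next1 seen1 h
    simp only [levelA, Option.some_inj, Prod.mk.injEq] at h
    exact ⟨[], by simp [h.1.symm, h.2.symm]⟩
  | cons v rest ih =>
    intro next seen next1 seen1 h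
    simp only [levelA] at h
    cases hnb : nbLoopA V W (pyNeighbours v) next seen with
    | none => rw [hnb] at h; simp at h
    | some p =>
      obtain ⟨next', seen'⟩ := p
      rw [hnb] at h
      obtain ⟨add1, e1, e2, hm1, hnd1⟩ := nbLoopA_adds V W _ next seen next' seen' hnb
      obtain ⟨add2, f1, f2, hm2, hnd2⟩ := ih next' seen' next1 seen1 h
      subst e1 e2 f1 f2
      refine ⟨add1 ++ add2, by rw [List.append_assoc], by rw [List.append_assoc], ?_, ?_⟩
      · intro x hx
        rcases List.mem_append.mp hx with hx1 | hx2
        · exact hm1 x hx1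
        · have := hm2 x hx2
          exact ⟨this.1, fun hc => this.2 (List.mem_append_left _ hc)⟩
      · refine List.Nodup.append hnd1 hnd2 ?_
        intro x hx1 hx2
        exact (hm2 x hx2).2 (List.mem_append_right _ hx1)

-- loop invariant used only to bound A's fuel
def InvBFS (P : Int × Int) (V : List (Int × Int))
    (cur : List (Int × Int)) (seen : PySem.Set (Int × Int)) : Prop :=
  seen.Nodup ∧ (∀ x ∈ seen, x ∈ P :: V) ∧ (∀ x ∈ cur, x ∈ seen)

theorem nodup_subset_length_le {α : Type} [DecidableEq α] [BEq α] [LawfulBEq α]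
    (l m : List α) (hn : l.Nodup) (hs : ∀ x ∈ l, x ∈ m) :
    l.length ≤ (PySem.Set.ofList m).length := by
  have h1 : l.toFinset.card = l.length := List.toFinset_card_of_nodup hn
  have h2 : (PySem.Set.ofList m).toFinset.card = (PySem.Set.ofList m).length :=
    List.toFinset_card_of_nodup (PySem.Set.nodup_ofList m)
  have h3 : l.toFinset ⊆ (PySem.Set.ofList m).toFinset := by
    intro x hx
    simp only [List.mem_toFinset, PySem.Set.mem_ofList] at *
    exact hs x hx
  have h4 := Finset.card_le_card h3
  omega

-- with enough fuel, A's while loop never exhausts it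
theorem outerA_suff (P : Int × Int) (V W : List (Int × Int)) :
    ∀ (f : Nat) (cur : List (Int × Int)) (seen : PySem.Set (Int × Int)) (steps : Int),
    InvBFS P V cur seen →
    (PySem.Set.ofList (P :: V)).length + 1 ≤ f + seen.length →
    outerA V W f cur seen steps ≠ none := by
  intro f
  induction f with
  | zero =>
    intro cur seen steps hinv hfuel
    cases cur with
    | nil => simp [outerA]
    | cons v rest =>
      exfalso
      have hle := nodup_subset_length_le seen (P :: V) hinv.1 hinv.2.1
      omega
  | succ f ih =>
    intro cur seen steps hinv hfuel
    cases cur with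
    | nil => simp [outerA]
    | cons v rest =>
      simp only [outerA]
      cases hl : levelA V W (v :: rest) [] seen with
      | none => simp
      | some p =>
        obtain ⟨next, seen1⟩ := p
        obtain ⟨add, e1, e2, hm, hnd⟩ := levelA_adds V W (v :: rest) [] seen next seen1 hl
        simp only [List.nil_append] at e1
        subst e1 e2
        cases next with
        | nil => simp [outerA]
        | cons a as =>
          apply ih
          · refine ⟨hinv.1.append hnd (fun x hx1 hx2 => (hm x hx2).2 hx1), ?_, ?_⟩
            · intro x hx
              rcases List.mem_append.mp hx with h1 | h2
              · exact hinv.2.1 x h1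
              · exact List.mem_cons_of_mem _ ((hm x h2).1)
            · intro x hx
              exact List.mem_append_right _ hx
          · simp only [List.length_append, List.length_cons]
            omega

-- the bisimulation: A's (current, seen) loop and B's region loop return the same value.
-- pre = seen ∖ current are the fully processed cells: not exposed, visited-neighbours absorbed.
theorem bisim (V W : List (Int × Int)) :
    ∀ (f : Nat) (pre cur : List (Int × Int)) (seen : PySem.Set (Int × Int)) (steps r : Int),
    cur ≠ [] →
    seen = pre ++ cur →
    seen.Nodup →
    (∀ u ∈ pre, exposedB V W u = false ∧ ∀ n ∈ pyNeighbours u, n ∈ V → n ∈ seen) →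
    outerA V W f cur seen steps = some r →
    loopC V W f seen steps = some r := by
  intro f
  induction f with
  | zero =>
    intro pre cur seen steps r hne hsplit hnd hpre h
    cases cur with
    | nil => exact absurd rfl hne
    | cons v rest => exact absurd h (by simp [outerA])
  | succ f ih =>
    intro pre cur seen steps r hne hsplit hnd hpre h
    cases cur with
    | nil => exact absurd rfl hne
    | cons v rest =>
      simp only [outerA] at h
      simp only [loopC]
      cases hl : levelA V W (v :: rest) [] seen with
      | none =>
        rw [hl] at h
        obtain ⟨u, hu, hex⟩ := (levelA_none_iff V W _ [] seen).mp hl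
        have hany : seen.any (exposedB V W) = true := by
          rw [List.any_eq_true]
          exact ⟨u, by rw [hsplit]; exact List.mem_append_right _ hu, hex⟩
        rw [if_pos hany]
        exact h
      | some p =>
        obtain ⟨next, seen1⟩ := p
        rw [hl] at h
        -- no cell of the whole region is exposed
        have hnolvl : ¬ ∃ u ∈ v :: rest, exposedB V W u = true := by
          rw [← levelA_none_iff V W _ [] seen]
          intro hc; rw [hc] at hl; simp at hl
        have hany : seen.any (exposedB V W) = false := by
          rw [List.any_eq_false]
          intro x hx
          rw [hsplit] at hx
          rcases List.mem_append.mp hx with hx1 | hx2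
          · simp [(hpre x hx1).1]
          · intro hc; exact hnolvl ⟨x, hx2, hc⟩
        rw [if_neg (by simp [hany])]
        -- B's growth step equals A's level result
        have hgrow : growB V seen = seen1 := by
          rw [growB]
          have hfold := levelA_some_seen V W (v :: rest) [] seen next seen1 hl
          have hpreid : pre.foldl (growCell V) seen = seen := by
            clear hfold
            have : ∀ (l : List (Int × Int)),
                (∀ u ∈ l, ∀ n ∈ pyNeighbours u, n ∈ V → n ∈ seen) →
                l.foldl (growCell V) seen = seen := by
              intro l
              induction l with
              | nil => intro _; rfl
              | cons a l ihl =>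
                intro hl'
                simp only [List.foldl_cons]
                rw [growCell_id V seen a (hl' a List.mem_cons_self)]
                exact ihl (fun u hu => hl' u (List.mem_cons_of_mem _ hu))
            exact this pre (fun u hu => (hpre u hu).2)
          calc List.foldl (growCell V) seen seen
              = List.foldl (growCell V) seen (pre ++ v :: rest) := by rw [← hsplit]
            _ = List.foldl (growCell V) (List.foldl (growCell V) seen pre) (v :: rest) := by
                rw [List.foldl_append]
            _ = seen1 := by rw [hpreid, ← hfold]
        obtain ⟨add, e1, e2, hm, hndadd⟩ := levelA_adds V W (v :: rest) [] seen next seen1 hl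
        simp only [List.nil_append] at e1
        have hnd1 : seen1.Nodup := by
          rw [e2]
          exact hnd.append hndadd (fun x hx1 hx2 => (hm x hx2).2 hx1)
        cases hadd : add with
        | nil =>
          -- fixpoint: A's next frontier is empty, both return -1
          have hlen : (growB V seen).length = seen.length := by
            rw [hgrow, e2, hadd]; simp
          rw [if_pos hlen]
          rw [e1, hadd] at h
          simp only [outerA, Option.some_inj] at h
          rw [← h]
        | cons a as =>
          have hlen : ¬ (growB V seen).length = seen.length := by
            rw [hgrow, e2, hadd]; simp
          rw [if_neg hlen]
          rw [hgrow]
          -- new invariant: pre' = seen, cur' = add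
          refine ih seen add seen1 (steps + 1) r (by rw [hadd]; simp) (by rw [e2]) hnd1 ?_ ?_
          · intro u hu
            constructor
            · rw [hsplit] at hu
              rcases List.mem_append.mp hu with hu1 | hu2
              · exact (hpre u hu1).1
              · rw [Bool.eq_false_iff]
                intro hc; exact hnolvl ⟨u, hu2, hc⟩
            · intro n hn hv
              rw [hsplit] at hu
              rcases List.mem_append.mp hu with hu1 | hu2
              · rw [e2]
                exact List.mem_append_left _ ((hpre u hu1).2 n hn hv)
              · have := foldl_growCell_closure V (v :: rest) seen u hu2 n hn hv
                rw [← levelA_some_seen V W (v :: rest) [] seen next seen1 hl] at this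
                exact this
          · rw [← e1]
            exact h

-- ===== VERDICT (by name: the statement is the Claim_ definition above) =====
theorem to_empty_square_spec : Claim_equal_to_empty_square := by
  intro pos V W _hdom
  unfold Spec_to_empty_square to_empty_square to_empty_square_alt
  by_cases hg : pos ∉ V ∧ pos ∉ W
  · rw [if_pos hg, if_pos hg]
  · rw [if_neg hg, if_neg hg]
    have hseen0 : PySem.Set.add PySem.Set.empty pos = [pos] := rfl
    have hseen0' : PySem.Set.ofList [pos] = [pos] := rfl
    have hinv : InvBFS pos V [pos] [pos] := by
      refine ⟨List.nodup_singleton pos, ?_, fun x hx => hx⟩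
      intro x hx
      rw [List.mem_singleton] at hx
      subst hx
      exact List.mem_cons_self
    have hbound : (PySem.Set.ofList (pos :: V)).length ≤ V.length + 1 := by
      have := PySem.Set.length_ofList_le (pos :: V)
      simpa using this
    have hne := outerA_suff pos V W (V.length + 2) [pos] [pos] 0 hinv
      (by simp only [List.length_singleton]; omega)
    obtain ⟨r, hr⟩ := Option.ne_none_iff_exists'.mp hne
    have hb := bisim V W (V.length + 2) [] [pos] [pos] 0 r (by simp) rfl
      (List.nodup_singleton pos) (by simp) hr
    rw [hseen0, hseen0', hr, hb]
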